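-- pv_equiv track=rewrite | github.com/mikefroetek/SAP-datasheet-filter | final_processor.py | assign_items_to_parents
-- ===== SOURCE A (Python) =====
-- from collections import defaultdict
--
-- def assign_items_to_parents(all_items, child_items, parent_materials):
--     """
--     Assign child items to their parent materials based on sequence
--     """
--     parent_mapping = defaultdict(list)
--
--     # Simple sequential assignment based on order in original data
--     current_parent_idx = 0
--     items_per_parent = max(1, len(child_items) // max(1, len(parent_materials)))
--
--     for i, child_item in enumerate(child_items):
--         if i > 0 and i % items_per_parent == 0 and current_parent_idx < len(parent_materials) - 1:
--             current_parent_idx += 1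
--
--         if current_parent_idx < len(parent_materials):
--             parent_material = parent_materials[current_parent_idx]
--             parent_mapping[parent_material].append(child_item)
--
--     # If no proper assignment, assign all to first parent
--     if not parent_mapping and parent_materials:
--         for child_item in child_items:
--             parent_mapping[parent_materials[0]].append(child_item)
--
--     return parent_mapping
-- ===== SOURCE B (Python) =====
-- from collections import defaultdict
--
-- def assign_items_to_parents(all_items, child_items, parent_materials):
--     """
--     Assign child items to their parent materials based on sequence
--     """
--     parent_mapping = defaultdict(list)
--     n = len(parent_materials)
--     items_per_parent = max(1, len(child_items) // max(1, n))
--     for j in range(n):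
--         if j < n - 1:
--             block = child_items[j * items_per_parent:(j + 1) * items_per_parent]
--         else:
--             block = child_items[j * items_per_parent:]
--         if block:
--             parent_mapping[parent_materials[j]].extend(block)
--     return parent_mapping
-- ===== Notes on version B (the rewrite author's own statement) =====
-- stated objective: alternative
-- what changed: Replaces the per-item loop with a stateful parent counter by a per-parent grouping pass: for each parent index j it takes the contiguous slice of child_items that belongs to j (the tail slice for the last parent) and extends the mapping once per non-empty slice.
import Mathlib
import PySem

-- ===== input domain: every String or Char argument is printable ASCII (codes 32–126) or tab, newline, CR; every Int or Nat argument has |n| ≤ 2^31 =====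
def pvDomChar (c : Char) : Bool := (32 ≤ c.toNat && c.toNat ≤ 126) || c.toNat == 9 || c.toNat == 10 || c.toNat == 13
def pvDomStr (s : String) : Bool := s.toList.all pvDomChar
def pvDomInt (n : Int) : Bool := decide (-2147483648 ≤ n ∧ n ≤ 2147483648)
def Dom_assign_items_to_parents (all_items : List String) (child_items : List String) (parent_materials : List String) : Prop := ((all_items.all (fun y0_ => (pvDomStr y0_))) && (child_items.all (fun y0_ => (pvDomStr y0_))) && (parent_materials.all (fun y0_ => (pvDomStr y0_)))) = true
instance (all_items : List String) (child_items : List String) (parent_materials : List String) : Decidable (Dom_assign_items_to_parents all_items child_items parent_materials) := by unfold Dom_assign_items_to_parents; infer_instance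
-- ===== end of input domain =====

-- B replaces A's per-item loop with a stateful parent counter by a per-parent pass over contiguous slices of child_items (same result, different decomposition).

-- ===== PORT A =====
-- one iteration of A's `for i, child in enumerate(child_items)` loop; state = (parent_mapping, current_parent_idx, i)
def pvAStep (parent_materials : List String) (ipp plen : Int)
    (st : PySem.Dict String (List String) × Int × Int) (child : String) :
    PySem.Dict String (List String) × Int × Int :=
  let d := st.1
  let i := st.2.2
  let cur := if i > 0 ∧ PySem.Int.mod i ipp = 0 ∧ st.2.1 < plen - 1 then st.2.1 + 1 else st.2.1
  let d' := if cur < plen then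
      match PySem.List.pyGet? parent_materials cur with
      | some pm => d.modify pm [] (fun l => l ++ [child])   -- defaultdict: parent_mapping[pm].append(child)
      | none => d                                           -- unreachable: 0 ≤ cur < len(parent_materials)
    else d
  (d', cur, i + 1)

def assign_items_to_parents (all_items : List String) (child_items : List String) (parent_materials : List String) : List (String × List String) :=
  let plen : Int := (parent_materials.length : Int)
  let ipp : Int := max 1 (PySem.Int.floordiv (child_items.length : Int) (max 1 plen))
  let st := child_items.foldl (pvAStep parent_materials ipp plen) (PySem.Dict.empty, 0, 0)
  -- if not parent_mapping and parent_materials: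
  let d := if st.1.items = [] ∧ parent_materials ≠ [] then
      child_items.foldl
        (fun d child =>
          match PySem.List.pyGet? parent_materials 0 with
          | some pm => d.modify pm [] (fun l => l ++ [child])
          | none => d)
        st.1
    else st.1
  d.items

-- ===== PORT B =====
-- one iteration of B's `for j in range(n)` loop
def pvBStep (child_items parent_materials : List String) (ipp n : Int)
    (d : PySem.Dict String (List String)) (j : Int) : PySem.Dict String (List String) :=
  let block := if j < n - 1
    then PySem.List.slice child_items (some (j * ipp)) (some ((j + 1) * ipp))
    else PySem.List.slice child_items (some (j * ipp)) none
  if block = [] then d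
  else match PySem.List.pyGet? parent_materials j with
    | some pm => d.modify pm [] (fun l => l ++ block)       -- parent_mapping[pm].extend(block)
    | none => d                                             -- unreachable: 0 ≤ j < len(parent_materials)

def assign_items_to_parents_alt (all_items : List String) (child_items : List String) (parent_materials : List String) : List (String × List String) :=
  let n : Int := (parent_materials.length : Int)
  let ipp : Int := max 1 (PySem.Int.floordiv (child_items.length : Int) (max 1 n))
  ((PySem.List.pyRange 0 n 1).foldl (pvBStep child_items parent_materials ipp n) PySem.Dict.empty).items

-- ===== PRECONDITION & SPEC =====
def Spec_assign_items_to_parents (all_items : List String) (child_items : List String) (parent_materials : List String) (out : List (String × List String)) : Prop := out = assign_items_to_parents_alt all_items child_items parent_materials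
instance (all_items : List String) (child_items : List String) (parent_materials : List String) (out : List (String × List String)) : Decidable (Spec_assign_items_to_parents all_items child_items parent_materials out) := by unfold Spec_assign_items_to_parents; infer_instance

-- ===== CLAIM (what is proved, stated in full; the proofs are below) =====
def Claim_equal_assign_items_to_parents : Prop := ∀ (all_items : List String) (child_items : List String) (parent_materials : List String), Dom_assign_items_to_parents all_items child_items parent_materials → Spec_assign_items_to_parents all_items child_items parent_materials (assign_items_to_parents all_items child_items parent_materials)

-- ===== LEMMAS AND PROOFS =====

-- proof-side helpers: key of parent index m, append a block to a key,
-- A's loop re-indexed over Nat (child i goes to parent min(i/k, p-1)), B's loop body over Nat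
def pvKey (ps : List String) (m : Nat) : String := ps.getD m ""

def pvApp (d : PySem.Dict String (List String)) (key : String) (block : List String) :
    PySem.Dict String (List String) := d.insert key (d.getD key [] ++ block)

def pvA (ps : List String) (k : Nat) : List String → Nat → PySem.Dict String (List String) → PySem.Dict String (List String)
  | [], _, d => d
  | x :: xs, i, d => pvA ps k xs (i + 1) (pvApp d (pvKey ps (min (i / k) (ps.length - 1))) [x])

def pvExt (cs ps : List String) (k : Nat) (d : PySem.Dict String (List String)) (j : Nat) :
    PySem.Dict String (List String) :=
  let block := if j < ps.length - 1 then (cs.drop (j * k)).take k else cs.drop (j * k)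
  if block = [] then d else pvApp d (pvKey ps j) block

theorem pvApp_pvApp (d : PySem.Dict String (List String)) (key : String) (u v : List String) :
    pvApp (pvApp d key u) key v = pvApp d key (u ++ v) := by
  simp [pvApp, PySem.Dict.getD_insert_self, PySem.Dict.insert_insert_self, List.append_assoc]

theorem pvApp_items_ne_nil (d : PySem.Dict String (List String)) (key : String) (v : List String) :
    (pvApp d key v).items ≠ [] := by
  unfold pvApp
  rw [PySem.Dict.items_insert]
  split
  · rename_i hc
    have hk : key ∈ d.keys := (PySem.Dict.contains_iff_mem_keys d key).mp hc
    simp only [PySem.Dict.keys] at hk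
    intro h
    rw [List.map_eq_nil_iff] at h
    simp [h] at hk
  · simp

theorem pvA_append (ps : List String) (k : Nat) (xs ys : List String) (i : Nat)
    (d : PySem.Dict String (List String)) :
    pvA ps k (xs ++ ys) i d = pvA ps k ys (i + xs.length) (pvA ps k xs i d) := by
  induction xs generalizing i d with
  | nil => simp [pvA]
  | cons x xs ih =>
    simp only [List.cons_append, pvA, ih, List.length_cons]
    ring_nf

theorem pvA_const (ps : List String) (k : Nat) (xs : List String) (i m : Nat)
    (d : PySem.Dict String (List String))
    (h : ∀ t, t < xs.length → min ((i + t) / k) (ps.length - 1) = m) :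
    pvA ps k xs i d = if xs = [] then d else pvApp d (pvKey ps m) xs := by
  induction xs generalizing i d with
  | nil => simp [pvA]
  | cons x xs ih =>
    have h0 : min (i / k) (ps.length - 1) = m := by
      have := h 0 (by simp); simpa using this
    rw [pvA, h0, ih (i + 1) (pvApp d (pvKey ps m) [x])
        (fun t ht => by have := h (t + 1) (by simp; omega); rw [show i + 1 + t = i + (t + 1) by omega]; exact this)]
    by_cases hxs : xs = []
    · simp [hxs]
    · simp only [hxs, if_false, List.cons_ne_nil]
      rw [pvApp_pvApp]
      rfl

theorem pvA_items_ne_nil (ps : List String) (k : Nat) (l : List String) (i : Nat)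
    (d : PySem.Dict String (List String)) (hd : d.items ≠ []) :
    (pvA ps k l i d).items ≠ [] := by
  induction l generalizing i d with
  | nil => exact hd
  | cons x xs ih => exact ih (i + 1) _ (pvApp_items_ne_nil _ _ _)

-- how A's current_parent_idx moves: after child i it is min(i/k, p-1)
theorem pv_idx_step (k p i : Nat) (hp : 0 < p) :
    min (i / k) (p - 1) =
      if 0 < i ∧ i % k = 0 ∧ min ((i - 1) / k) (p - 1) < p - 1
      then min ((i - 1) / k) (p - 1) + 1 else min ((i - 1) / k) (p - 1) := by
  match i with
  | 0 => simp
  | n + 1 =>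
    have hq : (n + 1) / k = n / k + if k ∣ n + 1 then 1 else 0 := Nat.succ_div
    have hm : (n + 1) % k = 0 ↔ k ∣ n + 1 := ⟨Nat.dvd_of_mod_eq_zero, Nat.mod_eq_zero_of_dvd⟩
    by_cases hd : k ∣ n + 1
    · rw [if_pos hd] at hq
      simp only [Nat.add_sub_cancel, hm, hd, true_and, Nat.zero_lt_succ]
      split_ifs <;> omega
    · rw [if_neg hd] at hq
      have hne : ¬ ((n + 1) % k = 0) := fun h => hd (hm.mp h)
      simp only [hne, false_and, and_false, if_false, Nat.add_sub_cancel]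
      rw [hq]; simp

-- A's loop, re-indexed over Nat
theorem pv_a_loop (ps : List String) (k : Nat) (hp : 0 < ps.length)
    (l : List String) (i : Nat) (d : PySem.Dict String (List String)) :
    (l.foldl (pvAStep ps (k : Int) (ps.length : Int))
        (d, ((min ((i - 1) / k) (ps.length - 1) : Nat) : Int), (i : Int))).1
      = pvA ps k l i d := by
  induction l generalizing i d with
  | nil => rfl
  | cons x xs ih =>
    rw [List.foldl_cons, pvA]
    set m := min ((i - 1) / k) (ps.length - 1) with hm
    set m' := min (i / k) (ps.length - 1) with hm'
    have hcond : ((i : Int) > 0 ∧ PySem.Int.mod (i : Int) (k : Int) = 0 ∧ (m : Int) < (ps.length : Int) - 1)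
        ↔ (0 < i ∧ i % k = 0 ∧ m < ps.length - 1) := by
      rw [PySem.Int.mod_natCast]
      constructor
      · rintro ⟨h1, h2, h3⟩; exact ⟨by exact_mod_cast h1, by exact_mod_cast h2, by omega⟩
      · rintro ⟨h1, h2, h3⟩; exact ⟨by exact_mod_cast h1, by exact_mod_cast h2, by omega⟩
    have hcur : (if (i : Int) > 0 ∧ PySem.Int.mod (i : Int) (k : Int) = 0 ∧ (m : Int) < (ps.length : Int) - 1
        then (m : Int) + 1 else (m : Int)) = ((m' : Int)) := by
      by_cases hc : 0 < i ∧ i % k = 0 ∧ m < ps.length - 1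
      · rw [if_pos (hcond.mpr hc)]
        have := pv_idx_step k ps.length i hp
        rw [← hm, ← hm', if_pos hc] at this
        rw [this]; push_cast; ring
      · rw [if_neg (fun h => hc (hcond.mp h))]
        have := pv_idx_step k ps.length i hp
        rw [← hm, ← hm', if_neg hc] at this
        rw [this]
    have hm'lt : m' < ps.length := by omega
    have hget : PySem.List.pyGet? ps ((m' : Nat) : Int) = some (ps.getD m' "") := by
      rw [PySem.List.pyGet?_natCast, List.getElem?_eq_getElem hm'lt, List.getD_eq_getElem ps "" hm'lt]
    show (List.foldl (pvAStep ps (k : Int) (ps.length : Int)) (pvAStep ps _ _ _ x) xs).1 = _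
    have hstep : pvAStep ps (k : Int) (ps.length : Int) (d, ((m : Nat) : Int), (i : Int)) x
        = (pvApp d (pvKey ps m') [x], ((m' : Nat) : Int), ((i + 1 : Nat) : Int)) := by
      simp only [pvAStep]
      rw [hcur, if_pos (show ((m' : Nat) : Int) < (ps.length : Int) by exact_mod_cast hm'lt), hget]
      push_cast
      rfl
    rw [hstep]
    have hnext : min ((i + 1 - 1) / k) (ps.length - 1) = m' := by simp [hm']
    rw [← hnext]
    exact ih (i + 1) (pvApp d (pvKey ps m') [x])

theorem pvExt_id (cs ps : List String) (k j : Nat) (d : PySem.Dict String (List String))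
    (h : cs.length ≤ j * k) : pvExt cs ps k d j = d := by
  have hd : cs.drop (j * k) = [] := List.drop_eq_nil_of_le h
  unfold pvExt
  simp [hd]

theorem pv_foldl_id {α β : Type} (f : β → α → β) (l : List α) (d : β)
    (h : ∀ x ∈ l, ∀ d', f d' x = d') : l.foldl f d = d := by
  induction l generalizing d with
  | nil => rfl
  | cons x xs ih =>
    rw [List.foldl_cons, h x (by simp), ih]
    intro y hy d'; exact h y (by simp [hy]) d'

-- the heart: processing children i ≥ j*k one by one equals processing parents j, j+1, … block by block
theorem pv_main (cs ps : List String) (k : Nat) (hk : 0 < k) :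
    ∀ (n j : Nat) (d : PySem.Dict String (List String)), j + n + 1 = ps.length →
      pvA ps k (cs.drop (j * k)) (j * k) d = (List.range' j (n + 1)).foldl (pvExt cs ps k) d := by
  intro n
  induction n with
  | zero =>
    intro j d hj
    have hconst : ∀ t, t < (cs.drop (j * k)).length →
        min ((j * k + t) / k) (ps.length - 1) = j := by
      intro t _
      have h1 : j ≤ (j * k + t) / k := (Nat.le_div_iff_mul_le hk).mpr (by omega)
      omega
    rw [pvA_const ps k _ (j * k) j d hconst]
    rw [List.range'_one]
    simp only [List.foldl_cons, List.foldl_nil, pvExt]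
    rw [if_neg (show ¬ (j < ps.length - 1) by omega)]
  | succ n ih =>
    intro j d hj
    have hjlt : j < ps.length - 1 := by omega
    set xs := cs.drop (j * k) with hxs
    have hsplit : xs = xs.take k ++ xs.drop k := (List.take_append_drop k xs).symm
    have htake : ∀ t, t < (xs.take k).length → min ((j * k + t) / k) (ps.length - 1) = j := by
      intro t ht
      have htk : t < k := lt_of_lt_of_le ht (by simp [List.length_take])
      have : (j * k + t) / k = j := by
        rw [Nat.mul_comm, Nat.mul_add_div hk, Nat.div_eq_of_lt htk]; omega
      omega
    have hd1 : pvA ps k (xs.take k) (j * k) d = pvExt cs ps k d j := by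
      rw [pvA_const ps k _ (j * k) j d htake]
      simp only [pvExt, if_pos hjlt, ← hxs]
    rw [List.range'_succ, List.foldl_cons, ← hd1]
    conv_lhs => rw [hsplit]
    rw [pvA_append]
    by_cases hlen : k ≤ xs.length
    · have hlt : (xs.take k).length = k := by simp [List.length_take]; omega
      have hdrop : xs.drop k = cs.drop ((j + 1) * k) := by
        rw [hxs, List.drop_drop]
        congr 1
        ring
      rw [hlt, hdrop, show j * k + k = (j + 1) * k by ring]
      exact ih (j + 1) _ (by omega)
    · have hdrop : xs.drop k = [] := List.drop_eq_nil_of_le (by omega)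
      rw [hdrop]
      show pvA ps k [] _ _ = _
      rw [pvA]
      refine (pv_foldl_id _ _ _ ?_).symm
      intro j' hj' d'
      have hj'' : j + 1 ≤ j' := by
        have := (List.mem_range'_1.mp hj').1
        omega
      have hcslen : cs.length ≤ j' * k := by
        have h1 : xs.length = cs.length - j * k := by rw [hxs, List.length_drop]
        have h2 : (j + 1) * k ≤ j' * k := Nat.mul_le_mul_right k hj''
        have h3 : (j + 1) * k = j * k + k := by ring
        omega
      exact pvExt_id cs ps k j' d' hcslen

-- B's loop body, re-indexed over Nat
theorem pv_b_step (cs ps : List String) (k : Nat) (j : Nat) (hj : j < ps.length)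
    (d : PySem.Dict String (List String)) :
    pvBStep cs ps (k : Int) (ps.length : Int) d (j : Int) = pvExt cs ps k d j := by
  have hget : PySem.List.pyGet? ps (j : Int) = some (ps.getD j "") := by
    rw [PySem.List.pyGet?_natCast, List.getElem?_eq_getElem hj, List.getD_eq_getElem ps "" hj]
  have hslice1 : PySem.List.slice cs (some ((j : Int) * (k : Int))) (some (((j : Int) + 1) * (k : Int)))
      = (cs.drop (j * k)).take k := by
    have h1 : ((j : Int) * (k : Int)) = ((j * k : Nat) : Int) := by push_cast; ring
    have h2 : (((j : Int) + 1) * (k : Int)) = ((j * k : Nat) : Int) + ((k : Nat) : Int) := by push_cast; ring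
    rw [h1, h2, PySem.List.slice_natCast_add]
  have hslice2 : PySem.List.slice cs (some ((j : Int) * (k : Int))) none = cs.drop (j * k) := by
    have h1 : ((j : Int) * (k : Int)) = ((j * k : Nat) : Int) := by push_cast; ring
    rw [h1, PySem.List.slice_from_natCast]
  simp only [pvBStep, pvExt]
  by_cases hc : j < ps.length - 1
  · rw [if_pos (show (j : Int) < (ps.length : Int) - 1 by omega), if_pos hc, hslice1]
    split
    · rfl
    · rw [hget]; rfl
  · rw [if_neg (show ¬ ((j : Int) < (ps.length : Int) - 1) by omega), if_neg hc, hslice2]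
    split
    · rfl
    · rw [hget]; rfl

-- the Int items-per-parent of the ports is the Nat value, cast
theorem pv_ipp_cast (c p : Nat) :
    max 1 (PySem.Int.floordiv (c : Int) (max 1 (p : Int))) = ((max 1 (c / max 1 p) : Nat) : Int) := by
  have h1 : (max 1 (p : Int)) = ((max 1 p : Nat) : Int) := by push_cast; rfl
  rw [h1, PySem.Int.floordiv_natCast]
  push_cast; rfl

-- parent_materials = [] : A's loop never touches the dict
theorem pv_a_empty (ipp : Int) (l : List String) (i : Int) :
    l.foldl (pvAStep [] ipp 0) (PySem.Dict.empty, 0, i) = (PySem.Dict.empty, 0, i + l.length) := by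
  induction l generalizing i with
  | nil => simp
  | cons x xs ih =>
    rw [List.foldl_cons]
    have hstep : pvAStep [] ipp 0 (PySem.Dict.empty, 0, i) x = (PySem.Dict.empty, 0, i + 1) := by
      simp [pvAStep]
    rw [hstep, ih]
    simp; ring

theorem pv_equiv (all_items child_items parent_materials : List String) :
    assign_items_to_parents all_items child_items parent_materials
      = assign_items_to_parents_alt all_items child_items parent_materials := by
  by_cases hps : parent_materials = []
  · subst hps
    simp only [assign_items_to_parents, assign_items_to_parents_alt, List.length_nil,
      Nat.cast_zero]
    rw [pv_a_empty]
    norm_num [PySem.List.pyRange_zero]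
  · have hp : 0 < parent_materials.length := List.length_pos_of_ne_nil hps
    set kN := max 1 (child_items.length / max 1 parent_materials.length) with hkN
    have hk : 0 < kN := by omega
    have hcast : max 1 (PySem.Int.floordiv (child_items.length : Int) (max 1 (parent_materials.length : Int))) = ((kN : Nat) : Int) :=
      pv_ipp_cast child_items.length parent_materials.length
    have hB : assign_items_to_parents_alt all_items child_items parent_materials
        = ((List.range' 0 parent_materials.length).foldl (pvExt child_items parent_materials kN) PySem.Dict.empty).items := by
      simp only [assign_items_to_parents_alt]
      rw [hcast, PySem.List.pyRange_zero_natCast, List.foldl_map, ← List.range_eq_range']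
      congr 1
      refine PySem.List.foldl_congr_mem _ _ _ _ ?_
      intro acc j hj
      exact pv_b_step child_items parent_materials kN j (List.mem_range.mp hj) acc
    have hA0 : (child_items.foldl (pvAStep parent_materials ((kN : Nat) : Int) (parent_materials.length : Int))
        (PySem.Dict.empty, 0, 0)).1 = pvA parent_materials kN child_items 0 PySem.Dict.empty := by
      have := pv_a_loop parent_materials kN hp child_items 0 PySem.Dict.empty
      simpa using this
    have hMain : pvA parent_materials kN child_items 0 PySem.Dict.empty
        = (List.range' 0 parent_materials.length).foldl (pvExt child_items parent_materials kN) PySem.Dict.empty := by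
      have := pv_main child_items parent_materials kN hk (parent_materials.length - 1) 0 PySem.Dict.empty (by omega)
      simpa [Nat.sub_add_cancel hp] using this
    rw [hB]
    simp only [assign_items_to_parents]
    rw [hcast, hA0, hMain]
    cases hcs : child_items with
    | nil => simp
    | cons x xs =>
      rw [hcs] at hMain
      have hne : ((List.range' 0 parent_materials.length).foldl (pvExt (x :: xs) parent_materials kN) PySem.Dict.empty).items ≠ [] := by
        rw [← hMain, pvA]
        exact pvA_items_ne_nil _ _ _ _ _ (pvApp_items_ne_nil _ _ _)
      rw [if_neg (by intro h; exact hne h.1)]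

-- ===== VERDICT (by name: the statement is the Claim_ definition above) =====
theorem assign_items_to_parents_spec : Claim_equal_assign_items_to_parents := by
  intro all_items child_items parent_materials _
  exact pv_equiv all_items child_items parent_materials
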